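-- pv_equiv track=rewrite | github.com/tkwang0530/LeetCode | 1300.py | findBestValue
-- ===== SOURCE A (Python) =====
-- from typing import List
--
-- def findBestValue(arr: List[int], target: int) -> int:
--     def calculate(value) -> int:
--         currentSum = 0
--         for num in arr:
--             toAdd = num if num < value else value
--             currentSum += toAdd
--         return abs(currentSum - target)
--
--     left, right = 0, target+1
--     while left < right:
--         mid = left + (right - left) // 2
--         scoreLeft = calculate(mid)
--         scoreRight = calculate(mid+1)
--
--         if scoreLeft <= scoreRight:
--             right = mid
--         else:
--             left = mid+1
--     return left
-- ===== SOURCE B (Python) =====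
-- from typing import List
--
-- def _consider(best, prefix, m, lo, hi, target):
--     # best (f, v) over segment [lo, hi] where clamped sum S(v) = prefix + m*v
--     if lo > hi:
--         return best
--     if m == 0:
--         cands = (lo,)
--     else:
--         v0 = (target - prefix) // m
--         cands = (min(max(v0, lo), hi), min(max(v0 + 1, lo), hi))
--     for v in cands:
--         f = abs(prefix + m * v - target)
--         if best is None or (f, v) < best:
--             best = (f, v)
--     return best
--
-- def findBestValue(arr: List[int], target: int) -> int:
--     # Sort once; the clamped sum is piecewise linear between sorted values,
--     # so the best value in each segment is found in closed form.
--     if target < 0: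
--         return 0
--     a = sorted(arr)
--     T1 = target + 1
--     best = None
--     prefix = 0
--     lo = 0
--     m = len(a)
--     for x in a:
--         best = _consider(best, prefix, m, lo, min(x, T1), target)
--         prefix += x
--         lo = max(lo, x + 1)
--         m -= 1
--     best = _consider(best, prefix, 0, lo, T1, target)
--     return best[1]
-- ===== Notes on version B (the rewrite author's own statement) =====
-- stated objective: faster
-- what changed: A binary-searches the answer over [0, target], re-scanning the whole array twice per probe; B sorts the array once, sweeps the sorted values with a running prefix sum, and minimizes the piecewise-linear clamped sum on each segment in closed form.
import Mathlib
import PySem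

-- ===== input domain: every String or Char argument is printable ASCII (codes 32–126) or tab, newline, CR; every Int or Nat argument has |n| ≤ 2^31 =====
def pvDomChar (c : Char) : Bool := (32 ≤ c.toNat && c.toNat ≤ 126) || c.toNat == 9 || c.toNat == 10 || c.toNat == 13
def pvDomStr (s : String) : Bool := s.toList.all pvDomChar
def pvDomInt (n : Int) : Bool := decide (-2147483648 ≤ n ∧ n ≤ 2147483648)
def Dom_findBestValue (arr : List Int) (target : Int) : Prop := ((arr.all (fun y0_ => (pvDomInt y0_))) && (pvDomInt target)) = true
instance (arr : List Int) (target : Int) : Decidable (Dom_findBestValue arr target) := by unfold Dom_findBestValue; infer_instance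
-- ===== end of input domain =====

-- B replaces A's binary search over [0, target] by sort + prefix sums: the clamped sum is
-- piecewise linear between sorted values, so each segment's best value is found in closed form.


-- ===== PORT A =====
-- calculate(value): |sum(min(num, value) for num in arr) - target|
def pvCalcA (arr : List Int) (target : Int) (value : Int) : Int :=
  |arr.foldl (fun s num => s + (if num < value then num else value)) 0 - target|

theorem pvMidBounds (l r : Int) (h : l < r) :
    l ≤ l + PySem.Int.floordiv (r - l) 2 ∧ l + PySem.Int.floordiv (r - l) 2 < r := by
  rw [PySem.Int.floordiv_eq_ediv_of_pos (by omega)]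
  omega

-- the while-loop of A
def pvLoopA (arr : List Int) (target : Int) (left right : Int) : Int :=
  if h : left < right then
    let mid := left + PySem.Int.floordiv (right - left) 2
    if pvCalcA arr target mid ≤ pvCalcA arr target (mid + 1) then
      pvLoopA arr target left mid
    else
      pvLoopA arr target (mid + 1) right
  else left
termination_by (right - left).toNat
decreasing_by
  · have := pvMidBounds left right h; omega
  · have := pvMidBounds left right h; omega

def findBestValue (arr : List Int) (target : Int) : Int :=
  pvLoopA arr target 0 (target + 1)

-- ===== PORT B =====
-- _consider(best, prefix, m, lo, hi, target) from Source B
-- the 'for v in cands' body: keep the lexicographically smaller (f, v)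
def pvUpd (target pre m : Int) (best : Option (Int × Int)) (v : Int) : Option (Int × Int) :=
  let f := |pre + m * v - target|
  match best with
  | none => some (f, v)
  | some (bf, bv) => if f < bf ∨ (f = bf ∧ v < bv) then some (f, v) else some (bf, bv)

def pvConsider (best : Option (Int × Int)) (pre m lo hi target : Int) : Option (Int × Int) :=
  if lo > hi then best
  else
    (if m = 0 then [lo]
     else
       let v0 := PySem.Int.floordiv (target - pre) m
       [min (max v0 lo) hi, min (max (v0 + 1) lo) hi]).foldl (pvUpd target pre m) best

-- the for-loop of Source B over the sorted list, with trailing final segment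
def pvScanB (target : Int) (best : Option (Int × Int)) (pre lo m : Int) :
    List Int → Option (Int × Int)
  | [] => pvConsider best pre 0 lo (target + 1) target
  | x :: rest =>
      pvScanB target (pvConsider best pre m lo (min x (target + 1)) target)
        (pre + x) (max lo (x + 1)) (m - 1) rest

def findBestValue_alt (arr : List Int) (target : Int) : Int :=
  if target < 0 then 0
  else
    let a := PySem.List.sorted arr (fun x => x) false
    match pvScanB target none 0 0 a.length a with
    | some (_, v) => v
    | none => 0  -- unreachable: the scan always records a candidate

-- ===== PRECONDITION & SPEC =====
def Spec_findBestValue (arr : List Int) (target : Int) (out : Int) : Prop := out = findBestValue_alt arr target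
instance (arr : List Int) (target : Int) (out : Int) : Decidable (Spec_findBestValue arr target out) := by unfold Spec_findBestValue; infer_instance

-- ===== CLAIM (what is proved, stated in full; the proofs are below) =====
def Claim_equal_findBestValue : Prop := ∀ (arr : List Int) (target : Int), Dom_findBestValue arr target → Spec_findBestValue arr target (findBestValue arr target)

-- ===== LEMMAS AND PROOFS =====

-- clamped sum: S(v) = Σ min(x, v)
def pvS (xs : List Int) (v : Int) : Int := (xs.map (fun x => min x v)).sum
-- score: f(v) = |S(v) - target|
def pvF (xs : List Int) (t v : Int) : Int := |pvS xs v - t|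
-- the predicate A's binary search works on
def pvP (xs : List Int) (t v : Int) : Prop := pvF xs t v ≤ pvF xs t (v + 1)

-- "u is the leftmost minimizer of f on [0, R]"
def pvIsLM (xs : List Int) (t R u : Int) : Prop :=
  0 ≤ u ∧ u ≤ R ∧ (∀ v, 0 ≤ v → v ≤ R → pvF xs t u ≤ pvF xs t v) ∧
    (∀ v, 0 ≤ v → v < u → pvF xs t u < pvF xs t v)

theorem pvLM_unique (xs : List Int) (t R u1 u2 : Int)
    (h1 : pvIsLM xs t R u1) (h2 : pvIsLM xs t R u2) : u1 = u2 := by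
  obtain ⟨a1, b1, c1, d1⟩ := h1
  obtain ⟨a2, b2, c2, d2⟩ := h2
  rcases lt_trichotomy u1 u2 with h | h | h
  · have := d2 u1 a1 h; have := c1 u2 a2 b2; omega
  · exact h
  · have := d1 u2 a2 h; have := c2 u1 a1 b1; omega

theorem pvCalcA_eq (arr : List Int) (t v : Int) : pvCalcA arr t v = pvF arr t v := by
  unfold pvCalcA pvF pvS
  rw [PySem.List.foldl_add]
  have h : ∀ x : Int, (if x < v then x else v) = min x v := by
    intro x; rcases lt_trichotomy x v with h | h | h <;> simp [min_def] <;> omega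
  simp only [h, zero_add]

theorem pvS_mono (xs : List Int) (v w : Int) (h : v ≤ w) : pvS xs v ≤ pvS xs w := by
  unfold pvS
  exact List.sum_le_sum (fun x _ => by omega)

theorem pvS_const_of_le (xs : List Int) (v : Int) (h : ∀ y ∈ xs, v ≤ y) :
    pvS xs v = xs.length * v := by
  induction xs with
  | nil => simp [pvS]
  | cons x r ih =>
      have hx : min x v = v := min_eq_right (h x (by simp))
      have := ih (fun y hy => h y (by simp [hy]))
      simp only [pvS, List.map_cons, List.sum_cons] at *
      rw [hx, this]
      simp only [List.length_cons]
      push_cast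
      ring

theorem pvS_plateau (xs : List Int) (v : Int) (h : pvS xs v = pvS xs (v + 1)) :
    pvS xs (v + 1) = pvS xs (v + 2) := by
  by_cases hall : ∀ x ∈ xs, x ≤ v
  · have hc : ∀ w, v ≤ w → pvS xs w = xs.sum := by
      intro w hw
      unfold pvS
      rw [List.map_congr_left (fun x hx => min_eq_left (le_trans (hall x hx) hw))]
      simp
    rw [hc (v + 1) (by omega), hc (v + 2) (by omega)]
  · push_neg at hall
    obtain ⟨x, hx, hxv⟩ := hall
    have : pvS xs v < pvS xs (v + 1) := by
      unfold pvS
      exact List.sum_lt_sum _ _ (fun i _ => by omega) ⟨x, hx, by omega⟩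
    omega

theorem pvP_mono (xs : List Int) (t v : Int) (h : pvP xs t v) : pvP xs t (v + 1) := by
  unfold pvP pvF at h ⊢
  by_cases hp : pvS xs v = pvS xs (v + 1)
  · have h2 := pvS_plateau xs v hp
    rw [show v + 1 + 1 = v + 2 by ring, h2]
  · have hlt : pvS xs v < pvS xs (v + 1) := lt_of_le_of_ne (pvS_mono xs v (v + 1) (by omega)) hp
    have hm2 : pvS xs (v + 1) ≤ pvS xs (v + 1 + 1) := pvS_mono xs (v + 1) (v + 1 + 1) (by omega)
    simp only [Int.abs_eq_natAbs] at h ⊢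
    omega

theorem pvP_mono_ge (xs : List Int) (t v w : Int) (hvw : v ≤ w) (h : pvP xs t v) : pvP xs t w := by
  induction w, hvw using Int.le_induction with
  | base => exact h
  | succ n hn ih => exact pvP_mono xs t n ih

theorem pvLoopA_spec (xs : List Int) (t R : Int) :
    ∀ l r, 0 ≤ l → l ≤ r → r ≤ R → (∀ v, 0 ≤ v → v < l → ¬ pvP xs t v) → (r < R → pvP xs t r) →
      l ≤ pvLoopA xs t l r ∧ pvLoopA xs t l r ≤ r ∧
        (∀ v, 0 ≤ v → v < pvLoopA xs t l r → ¬ pvP xs t v) ∧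
        (pvLoopA xs t l r < R → pvP xs t (pvLoopA xs t l r)) := by
  suffices H : ∀ n : Nat, ∀ l r, (r - l).toNat ≤ n → 0 ≤ l → l ≤ r → r ≤ R →
      (∀ v, 0 ≤ v → v < l → ¬ pvP xs t v) → (r < R → pvP xs t r) →
      l ≤ pvLoopA xs t l r ∧ pvLoopA xs t l r ≤ r ∧
        (∀ v, 0 ≤ v → v < pvLoopA xs t l r → ¬ pvP xs t v) ∧
        (pvLoopA xs t l r < R → pvP xs t (pvLoopA xs t l r)) by
    intro l r h0 h1 h2 h3 h4
    exact H (r - l).toNat l r le_rfl h0 h1 h2 h3 h4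
  intro n
  induction n with
  | zero =>
      intro l r hn h0 hlr hrR hH1 hPr
      have hl : ¬ l < r := by omega
      rw [pvLoopA, dif_neg hl]
      refine ⟨le_rfl, by omega, hH1, ?_⟩
      have : l = r := by omega
      intro h; exact this ▸ hPr (this ▸ h)
  | succ n ih =>
      intro l r hn h0 hlr hrR hH1 hPr
      by_cases h : l < r
      · rw [pvLoopA, dif_pos h]
        have hb := pvMidBounds l r h
        set mid := l + PySem.Int.floordiv (r - l) 2 with hmid
        simp only
        split_ifs with hc
        · -- right := mid ; P mid holds
          have hPm : pvP xs t mid := by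
            unfold pvP; rw [← pvCalcA_eq, ← pvCalcA_eq]; exact hc
          obtain ⟨a1, a2, a3, a4⟩ := ih l mid (by omega) h0 (by omega) (by omega) hH1 (fun _ => hPm)
          exact ⟨a1, by omega, a3, a4⟩
        · -- left := mid + 1 ; ¬ P mid
          have hNm : ¬ pvP xs t mid := by
            intro hp; exact hc (by rw [pvCalcA_eq, pvCalcA_eq]; exact hp)
          have hH1' : ∀ v, 0 ≤ v → v < mid + 1 → ¬ pvP xs t v := by
            intro v hv hvm hp
            exact hNm (pvP_mono_ge xs t v mid (by omega) hp)
          obtain ⟨a1, a2, a3, a4⟩ := ih (mid + 1) r (by omega) (by omega) (by omega) hrR hH1' hPr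
          exact ⟨by omega, a2, a3, a4⟩
      · rw [pvLoopA, dif_neg h]
        refine ⟨le_rfl, by omega, hH1, ?_⟩
        have : l = r := by omega
        intro hh; exact this ▸ hPr (this ▸ hh)

theorem pvA_isLM (arr : List Int) (t : Int) (ht : 0 ≤ t) :
    pvIsLM arr t (t + 1) (findBestValue arr t) := by
  unfold findBestValue
  obtain ⟨h1, h2, h3, h4⟩ := pvLoopA_spec arr t (t + 1) 0 (t + 1) le_rfl (by omega) le_rfl
    (by omega) (by omega)
  set u := pvLoopA arr t 0 (t + 1) with hu
  have hdown : ∀ v, 0 ≤ v → v < u → pvF arr t u < pvF arr t v := by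
    have : ∀ k : Nat, ∀ v, 0 ≤ v → v < u → (u - v).toNat ≤ k → pvF arr t u < pvF arr t v := by
      intro k
      induction k with
      | zero => intro v _ _ _; omega
      | succ k ih =>
          intro v hv hvu hk
          have hnp := h3 v hv hvu
          have hstep : pvF arr t (v + 1) < pvF arr t v := by
            unfold pvP at hnp; omega
          rcases eq_or_lt_of_le (show v + 1 ≤ u by omega) with he | hl
          · rw [he] at hstep; exact hstep
          · exact lt_trans (ih (v + 1) (by omega) hl (by omega)) hstep
    exact fun v hv hvu => this (u - v).toNat v hv hvu le_rfl
  have hup : u < t + 1 → ∀ v, u ≤ v → pvF arr t u ≤ pvF arr t v := by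
    intro huR v huv
    have : pvP arr t v → True := fun _ => trivial
    have key : ∀ v, u ≤ v → pvP arr t v ∧ pvF arr t u ≤ pvF arr t v := by
      intro w hw
      induction w, hw using Int.le_induction with
      | base => exact ⟨h4 huR, le_rfl⟩
      | succ n hn ihn =>
          obtain ⟨hPn, hFn⟩ := ihn
          exact ⟨pvP_mono arr t n hPn, le_trans hFn hPn⟩
    exact (key v huv).2
  refine ⟨h1, h2, ?_, hdown⟩
  intro v hv hvR
  rcases lt_or_ge v u with hlt | hge
  · exact le_of_lt (hdown v hv hlt)
  · rcases eq_or_lt_of_le h2 with he | hl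
    · have hvu : v = u := by omega
      rw [hvu]
    · exact hup hl v hge

-- lexicographic order on (score, value) pairs, as Python's tuple comparison uses it
def pvLexLE (q p : Int × Int) : Prop := q.1 < p.1 ∨ (q.1 = p.1 ∧ q.2 ≤ p.2)

-- "best is some pair lexicographically ≤ p"
def pvLeB (best : Option (Int × Int)) (p : Int × Int) : Prop :=
  ∃ q, best = some q ∧ pvLexLE q p

-- "best is none or records a genuine (score, value) pair with 0 ≤ value ≤ target+1"
def pvSound (xs : List Int) (t : Int) (best : Option (Int × Int)) : Prop :=
  best = none ∨ ∃ v, 0 ≤ v ∧ v ≤ t + 1 ∧ best = some (pvF xs t v, v)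

theorem pvLeB_trans {best : Option (Int × Int)} {q p : Int × Int}
    (h1 : pvLeB best q) (h2 : pvLexLE q p) : pvLeB best p := by
  obtain ⟨r, hr, hl⟩ := h1
  exact ⟨r, hr, by unfold pvLexLE at *; omega⟩

theorem pvUpd_self (t pre m : Int) (best : Option (Int × Int)) (v : Int) :
    pvLeB (pvUpd t pre m best v) (|pre + m * v - t|, v) := by
  cases best with
  | none => exact ⟨_, rfl, Or.inr ⟨rfl, le_rfl⟩⟩
  | some q =>
      obtain ⟨bf, bv⟩ := q
      unfold pvUpd
      simp only
      split_ifs with h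
      · exact ⟨_, rfl, Or.inr ⟨rfl, le_rfl⟩⟩
      · exact ⟨(bf, bv), rfl, by unfold pvLexLE; simp only; omega⟩

theorem pvUpd_mono (t pre m : Int) {best : Option (Int × Int)} {p : Int × Int} (v : Int)
    (h : pvLeB best p) : pvLeB (pvUpd t pre m best v) p := by
  obtain ⟨⟨bf, bv⟩, hb, hl⟩ := h
  subst hb
  unfold pvUpd
  simp only
  split_ifs with hc
  · exact ⟨_, rfl, by unfold pvLexLE at *; simp only at *; omega⟩
  · exact ⟨_, rfl, hl⟩

theorem pvUpd_sound (xs : List Int) (t pre m : Int) {best : Option (Int × Int)} (v : Int)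
    (hv : 0 ≤ v) (hvR : v ≤ t + 1) (hf : |pre + m * v - t| = pvF xs t v)
    (h : pvSound xs t best) : pvSound xs t (pvUpd t pre m best v) := by
  unfold pvSound at *
  rcases h with h | ⟨w, hw0, hwR, hw⟩
  · subst h
    exact Or.inr ⟨v, hv, hvR, by unfold pvUpd; rw [hf]⟩
  · subst hw
    unfold pvUpd
    simp only
    split_ifs with hc
    · exact Or.inr ⟨v, hv, hvR, by rw [hf]⟩
    · exact Or.inr ⟨w, hw0, hwR, rfl⟩

theorem pvConsider_mono (t pre m lo hi : Int) {best : Option (Int × Int)} {p : Int × Int}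
    (h : pvLeB best p) : pvLeB (pvConsider best pre m lo hi t) p := by
  unfold pvConsider
  split_ifs with h1 h2
  · exact h
  · simp only [List.foldl]
    exact pvUpd_mono _ _ _ _ h
  · simp only [List.foldl]
    exact pvUpd_mono _ _ _ _ (pvUpd_mono _ _ _ _ h)

theorem pvConsider_sound (xs : List Int) (t pre m lo hi : Int) {best : Option (Int × Int)}
    (hlo : 0 ≤ lo) (hhi : hi ≤ t + 1)
    (hseg : ∀ w, lo ≤ w → w ≤ hi → pvF xs t w = |pre + m * w - t|)
    (h : pvSound xs t best) : pvSound xs t (pvConsider best pre m lo hi t) := by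
  unfold pvConsider
  split_ifs with h1 h2
  · exact h
  · simp only [List.foldl]
    exact pvUpd_sound xs t pre m lo hlo (by omega) ((hseg lo le_rfl (by omega)).symm) h
  · simp only [List.foldl]
    have hlohi : lo ≤ hi := by omega
    have hc1 : lo ≤ min (max (PySem.Int.floordiv (t - pre) m) lo) hi ∧
        min (max (PySem.Int.floordiv (t - pre) m) lo) hi ≤ hi := by omega
    have hc2 : lo ≤ min (max (PySem.Int.floordiv (t - pre) m + 1) lo) hi ∧
        min (max (PySem.Int.floordiv (t - pre) m + 1) lo) hi ≤ hi := by omega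
    exact pvUpd_sound xs t pre m _ (by omega) (by omega)
      ((hseg _ hc2.1 hc2.2).symm)
      (pvUpd_sound xs t pre m _ (by omega) (by omega) ((hseg _ hc1.1 hc1.2).symm) h)

theorem pvConsider_opt (xs : List Int) (t pre m lo hi : Int) (best : Option (Int × Int))
    (hm : 0 ≤ m)
    (hseg : ∀ w, lo ≤ w → w ≤ hi → pvF xs t w = |pre + m * w - t|) :
    ∀ v, lo ≤ v → v ≤ hi → pvLeB (pvConsider best pre m lo hi t) (pvF xs t v, v) := by
  intro v hlov hvhi
  have hlohi : lo ≤ hi := le_trans hlov hvhi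
  unfold pvConsider
  rw [if_neg (by omega)]
  by_cases h2 : m = 0
  · rw [if_pos h2]
    simp only [List.foldl]
    refine pvLeB_trans (pvUpd_self t pre m best lo) ?_
    rw [hseg v hlov hvhi]
    subst h2
    have he : pre + 0 * lo - t = pre + 0 * v - t := by ring
    rw [he]
    exact Or.inr ⟨rfl, hlov⟩
  · rw [if_neg h2]
    have hmpos : 0 < m := by omega
    simp only [List.foldl]
    set v0 := PySem.Int.floordiv (t - pre) m with hv0
    have hbr : v0 * m ≤ t - pre ∧ t - pre < (v0 + 1) * m :=
      (PySem.Int.floordiv_eq_iff_of_pos hmpos).1 hv0.symm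
    set c1 := min (max v0 lo) hi with hc1
    set c2 := min (max (v0 + 1) lo) hi with hc2
    have hle1 : pvLeB (pvUpd t pre m (pvUpd t pre m best c1) c2) (|pre + m * c1 - t|, c1) :=
      pvUpd_mono _ _ _ _ (pvUpd_self t pre m best c1)
    have hle2 := pvUpd_self t pre m (pvUpd t pre m best c1) c2
    rcases le_or_gt v v0 with hcase | hcase
    · -- v ≤ v0 : candidate c1 lies in [v, v0], on the decreasing side of the score
      have ha : v ≤ c1 ∧ c1 ≤ v0 ∧ lo ≤ c1 ∧ c1 ≤ hi := by omega
      refine pvLeB_trans hle1 ?_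
      rw [hseg v hlov hvhi]
      have h5 : m * c1 ≤ m * v0 := mul_le_mul_of_nonneg_left ha.2.1 hm
      have h6 := hbr.1
      rw [mul_comm] at h6
      have k2 : m * v ≤ m * c1 := mul_le_mul_of_nonneg_left ha.1 hm
      unfold pvLexLE
      simp only
      rcases eq_or_lt_of_le ha.1 with he | hlt
      · subst he; exact Or.inr ⟨rfl, le_rfl⟩
      · left
        have k3 : m * v < m * c1 := mul_lt_mul_of_pos_left hlt hmpos
        rw [abs_of_nonpos (by omega), abs_of_nonpos (by omega)]
        omega
    · -- v0 < v : candidate c2 lies in [v0+1, v], on the increasing side of the score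
      have ha : v0 + 1 ≤ c2 ∧ c2 ≤ v ∧ lo ≤ c2 ∧ c2 ≤ hi := by omega
      refine pvLeB_trans hle2 ?_
      rw [hseg v hlov hvhi]
      have h5 : m * (v0 + 1) ≤ m * c2 := mul_le_mul_of_nonneg_left ha.1 hm
      have h6 := hbr.2
      rw [mul_comm] at h6
      have k2 : m * c2 ≤ m * v := mul_le_mul_of_nonneg_left ha.2.1 hm
      unfold pvLexLE
      simp only
      rcases eq_or_lt_of_le ha.2.1 with he | hlt
      · subst he; exact Or.inr ⟨rfl, le_rfl⟩
      · left
        have k3 : m * c2 < m * v := mul_lt_mul_of_pos_left hlt hmpos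
        rw [abs_of_nonneg (by omega), abs_of_nonneg (by omega)]
        omega

theorem pvS_nil (v : Int) : pvS [] v = 0 := by simp [pvS]

theorem pvS_cons (x : Int) (r : List Int) (v : Int) : pvS (x :: r) v = min x v + pvS r v := by
  simp [pvS]

theorem pvScanB_spec (xs : List Int) (t : Int) :
    ∀ (rest : List Int) (best : Option (Int × Int)) (pre lo : Int),
      List.Pairwise (· ≤ ·) rest → 0 ≤ lo →
      (∀ v, lo ≤ v → pvS xs v = pre + pvS rest v) →
      (pvSound xs t best → pvSound xs t (pvScanB t best pre lo rest.length rest)) ∧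
      (∀ p, pvLeB best p → pvLeB (pvScanB t best pre lo rest.length rest) p) ∧
      (∀ v, lo ≤ v → v ≤ t + 1 →
        pvLeB (pvScanB t best pre lo rest.length rest) (pvF xs t v, v)) := by
  intro rest
  induction rest with
  | nil =>
      intro best pre lo _ hlo hG
      have hseg : ∀ w, lo ≤ w → w ≤ t + 1 → pvF xs t w = |pre + 0 * w - t| := by
        intro w hw _
        unfold pvF
        rw [hG w hw, pvS_nil]
        ring_nf
      refine ⟨?_, ?_, ?_⟩
      · exact pvConsider_sound xs t pre 0 lo (t + 1) hlo le_rfl hseg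
      · exact fun p h => pvConsider_mono t pre 0 lo (t + 1) h
      · exact fun v hv hvR => pvConsider_opt xs t pre 0 lo (t + 1) best le_rfl hseg v hv hvR
  | cons x r ih =>
      intro best pre lo hsort hlo hG
      obtain ⟨hx, hr⟩ := List.pairwise_cons.1 hsort
      have hlen : ((x :: r).length : Int) - 1 = (r.length : Int) := by
        simp [List.length_cons]
      have hunf : pvScanB t best pre lo ((x :: r).length : Int) (x :: r) =
          pvScanB t (pvConsider best pre ((x :: r).length : Int) lo (min x (t + 1)) t)
            (pre + x) (max lo (x + 1)) ((r.length : Int)) r := by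
        rw [pvScanB, hlen]
      have hseg : ∀ w, lo ≤ w → w ≤ min x (t + 1) →
          pvF xs t w = |pre + ((x :: r).length : Int) * w - t| := by
        intro w hw hwx
        unfold pvF
        rw [hG w hw, pvS_const_of_le (x :: r) w (by
          intro y hy
          rcases List.mem_cons.1 hy with h | h
          · omega
          · have := hx y h; omega)]
      have hG' : ∀ v, max lo (x + 1) ≤ v → pvS xs v = (pre + x) + pvS r v := by
        intro v hv
        rw [hG v (by omega), pvS_cons, min_eq_left (by omega)]
        ring
      obtain ⟨ihs, ihm, iho⟩ :=
        ih (pvConsider best pre ((x :: r).length : Int) lo (min x (t + 1)) t)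
          (pre + x) (max lo (x + 1)) hr (by omega) hG'
      refine ⟨?_, ?_, ?_⟩
      · intro hs
        rw [hunf]
        exact ihs (pvConsider_sound xs t pre _ lo (min x (t + 1)) hlo (by omega) hseg hs)
      · intro p hp
        rw [hunf]
        exact ihm p (pvConsider_mono t pre _ lo (min x (t + 1)) hp)
      · intro v hv hvR
        rw [hunf]
        by_cases hvx : v ≤ min x (t + 1)
        · exact ihm _ (pvConsider_opt xs t pre _ lo (min x (t + 1)) best (by positivity) hseg v hv hvx)
        · exact iho v (by omega) hvR

theorem pvB_isLM (arr : List Int) (t : Int) (ht : 0 ≤ t) :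
    pvIsLM arr t (t + 1) (findBestValue_alt arr t) := by
  unfold findBestValue_alt
  rw [if_neg (by omega)]
  simp only
  have hperm : (PySem.List.sorted arr (fun x => x) false).Perm arr :=
    PySem.List.sorted_perm arr (fun x => x) false
  have hpair : List.Pairwise (· ≤ ·) (PySem.List.sorted arr (fun x => x) false) :=
    PySem.List.sorted_pairwise arr (fun x => x)
  have hG : ∀ v, (0 : Int) ≤ v →
      pvS arr v = 0 + pvS (PySem.List.sorted arr (fun x => x) false) v := by
    intro v _
    unfold pvS
    rw [zero_add]
    exact (List.Perm.sum_eq (hperm.map _)).symm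
  obtain ⟨hs, hm, hopt⟩ :=
    pvScanB_spec arr t (PySem.List.sorted arr (fun x => x) false) none 0 0 hpair le_rfl hG
  have hsound := hs (Or.inl rfl)
  have h0 := hopt 0 le_rfl (by omega)
  rcases hsound with hnone | ⟨w, hw0, hwR, hw⟩
  · rw [hnone] at h0
    obtain ⟨q, hq, _⟩ := h0
    exact absurd hq (by simp)
  · rw [hw]
    show pvIsLM arr t (t + 1) w
    refine ⟨hw0, hwR, ?_, ?_⟩
    · intro v hv hvR
      obtain ⟨q, hq, hl⟩ := hopt v hv hvR
      rw [hw] at hq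
      have hqe := Option.some.inj hq
      rw [← hqe] at hl
      unfold pvLexLE at hl
      simp at hl
      omega
    · intro v hv hvw
      obtain ⟨q, hq, hl⟩ := hopt v hv (by omega)
      rw [hw] at hq
      have hqe := Option.some.inj hq
      rw [← hqe] at hl
      unfold pvLexLE at hl
      simp at hl
      omega

-- ===== VERDICT (by name: the statement is the Claim_ definition above) =====
theorem findBestValue_spec : Claim_equal_findBestValue := by
  intro arr target _
  unfold Spec_findBestValue
  by_cases ht : target < 0
  · unfold findBestValue findBestValue_alt
    rw [pvLoopA, dif_neg (show ¬(0:Int) < target + 1 by omega), if_pos ht]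
  · exact pvLM_unique arr target (target + 1) _ _ (pvA_isLM arr target (by omega))
      (pvB_isLM arr target (by omega))
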